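-- pv_equiv track=rewrite | github.com/ritish1082/Page-Replacement-Visualizer | src/lru.py | least
-- ===== SOURCE A (Python) =====
-- def least(ls,pages,nframes,idx):
--     recent=idx
--     res=-1
--     for i in range(0,nframes):
--         for j in range(idx,-1,-1):
--             if ls[i]==pages[j]:
--                 if j < recent:
--                     recent=j
--                     res=i
--                 break
--     return res
-- ===== SOURCE B (Python) =====
-- def least(ls, pages, nframes, idx):
--     # Single backward pass over pages with a seen-set; for each page value's
--     # last use before idx, find the lowest matching frame; the final update
--     # (smallest last-use index) is the LRU frame.
--     if nframes <= 0:
--         return -1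
--     res = -1
--     seen = set()
--     for j in range(idx, -1, -1):
--         p = pages[j]
--         if p not in seen:
--             seen.add(p)
--             if j < idx:
--                 for i in range(nframes):
--                     if ls[i] == p:
--                         res = i
--                         break
--     return res
-- ===== Notes on version B (the rewrite author's own statement) =====
-- stated objective: alternative
-- what changed: A scans the pages backwards once per frame (frames outer, pages inner, min tracking); B makes a single backward pass over pages with a seen-set of page values, looking up the lowest matching frame only at each value's last use, so the final update is the LRU frame.
import Mathlib
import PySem

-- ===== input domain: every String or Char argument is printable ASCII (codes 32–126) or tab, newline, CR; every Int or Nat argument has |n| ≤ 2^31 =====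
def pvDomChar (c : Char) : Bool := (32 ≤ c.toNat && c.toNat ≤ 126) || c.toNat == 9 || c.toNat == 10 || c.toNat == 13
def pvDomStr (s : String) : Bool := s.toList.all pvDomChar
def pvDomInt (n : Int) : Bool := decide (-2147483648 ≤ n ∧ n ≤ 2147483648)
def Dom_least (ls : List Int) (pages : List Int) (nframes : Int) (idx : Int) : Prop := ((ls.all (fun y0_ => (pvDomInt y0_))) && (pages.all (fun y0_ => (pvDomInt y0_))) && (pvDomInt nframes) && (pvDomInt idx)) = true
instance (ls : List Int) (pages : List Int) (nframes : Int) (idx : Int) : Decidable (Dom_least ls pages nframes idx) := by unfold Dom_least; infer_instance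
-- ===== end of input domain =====

-- B replaces A's frames-outer/pages-inner min-tracking scan with one backward pass
-- over pages guarded by a seen-set (alternative decomposition, same exact result).

-- ===== PORT A =====
-- inner `for j in range(idx,-1,-1): … break` loop of A; state (recent, res)
def leastInner (ls pages : List Int) (i : Int) (js : List Int) (recent res : Int) : Int × Int :=
  match js with
  | [] => (recent, res)
  | j :: rest =>
    if PySem.List.pyGetD ls i 0 = PySem.List.pyGetD pages j 0 then
      if j < recent then (j, i) else (recent, res)
    else leastInner ls pages i rest recent res

def least (ls : List Int) (pages : List Int) (nframes : Int) (idx : Int) : Int :=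
  ((PySem.List.pyRange 0 nframes 1).foldl
    (fun st i => leastInner ls pages i (PySem.List.pyRange idx (-1) (-1)) st.1 st.2)
    (idx, -1)).2

-- ===== PORT B =====
-- B's inner `for i in range(nframes): … res = i; break` loop
def bFind (ls : List Int) (p : Int) (is_ : List Int) (res : Int) : Int :=
  match is_ with
  | [] => res
  | i :: rest => if PySem.List.pyGetD ls i 0 = p then i else bFind ls p rest res

-- B's outer `for j in range(idx,-1,-1)` loop with the seen-set
def bStep (ls pages : List Int) (nframes idx : Int) (js : List Int)
    (seen : PySem.Set Int) (res : Int) : Int :=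
  match js with
  | [] => res
  | j :: rest =>
    let p := PySem.List.pyGetD pages j 0
    if PySem.Set.contains seen p then
      bStep ls pages nframes idx rest seen res
    else
      bStep ls pages nframes idx rest (PySem.Set.add seen p)
        (if j < idx then bFind ls p (PySem.List.pyRange 0 nframes 1) res else res)

def least_alt (ls : List Int) (pages : List Int) (nframes : Int) (idx : Int) : Int :=
  if nframes ≤ 0 then -1
  else bStep ls pages nframes idx (PySem.List.pyRange idx (-1) (-1)) PySem.Set.empty (-1)

-- ===== PRECONDITION & SPEC =====
-- Pre_ excludes exactly the inputs where Python A raises IndexError: with at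
-- least one frame scanned and idx ≥ 0, a start index beyond pages (idx ≥ len(pages))
-- or a frame index beyond ls (nframes > len(ls)).
def Pre_least (ls : List Int) (pages : List Int) (nframes : Int) (idx : Int) : Prop :=
  nframes ≤ 0 ∨ idx < 0 ∨ (idx < (pages.length : Int) ∧ nframes ≤ (ls.length : Int))
instance (ls : List Int) (pages : List Int) (nframes : Int) (idx : Int) : Decidable (Pre_least ls pages nframes idx) := by unfold Pre_least; infer_instance

def pvWitness_least : List Int × List Int × Int × Int := ([1, 2], [1, 2, 1], 2, 2)

def Spec_least (ls : List Int) (pages : List Int) (nframes : Int) (idx : Int) (out : Int) : Prop := out = least_alt ls pages nframes idx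
instance (ls : List Int) (pages : List Int) (nframes : Int) (idx : Int) (out : Int) : Decidable (Spec_least ls pages nframes idx out) := by unfold Spec_least; infer_instance

-- ===== CLAIM (what is proved, stated in full; the proofs are below) =====
def Claim_equal_least : Prop := ∀ (ls : List Int) (pages : List Int) (nframes : Int) (idx : Int), Dom_least ls pages nframes idx → Pre_least ls pages nframes idx → Spec_least ls pages nframes idx (least ls pages nframes idx)

-- ===== LEMMAS AND PROOFS =====

-- [idx, idx-1, …, 0] as a function of idx.toNat
def DLst : Nat → List Int
  | 0 => [0]
  | k+1 => ((k : Int) + 1) :: DLst k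

-- [0, 1, …, k-1] as Ints
def ascL (k : Nat) : List Int := PySem.List.pyRange 0 (k : Int) 1

-- last use (largest j ≤ m with pages[j] = p), as a find on the countdown list
def luv (pages : List Int) (m : Nat) (p : Int) : Option Int :=
  (DLst m).find? (fun j => p == PySem.List.pyGetD pages j 0)

-- the (last-use, frame) candidate list, in frame order
def LAlist (ls pages : List Int) (m : Nat) (fs : List Int) : List (Int × Int) :=
  fs.filterMap (fun i => (luv pages m (PySem.List.pyGetD ls i 0)).map (fun j => (j, i)))

def minFold (L : List (Int × Int)) (st : Int × Int) : Int × Int :=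
  L.foldl (fun st q => if q.1 < st.1 then q else st) st

def minF : List (Int × Int) → Option Int
  | [] => none
  | q :: L => some (match minF L with | none => q.1 | some m => min q.1 m)

-- j < idx is a "win": j is the last use of pages[j] and some frame holds pages[j]
def winb (ls pages : List Int) (m : Nat) (fs : List Int) (j : Int) : Bool :=
  decide (j < (m : Int)) && (luv pages m (PySem.List.pyGetD pages j 0) == some j)
    && fs.any (fun i => PySem.List.pyGetD ls i 0 == PySem.List.pyGetD pages j 0)

lemma pyRange_down (k : Nat) : PySem.List.pyRange (k : Int) (-1) (-1) = DLst k := by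
  induction k with
  | zero =>
    rw [show ((0 : Nat) : Int) = 0 by norm_num]
    rw [PySem.List.pyRange_neg_one_cons (by omega)]
    rw [show (0 : Int) - 1 = -1 by ring]
    rw [PySem.List.pyRange_neg_one_eq_nil (by omega)]
    rfl
  | succ k ih =>
    rw [PySem.List.pyRange_neg_one_cons (by push_cast; omega)]
    rw [show ((k + 1 : Nat) : Int) - 1 = (k : Int) by push_cast; ring]
    rw [ih]
    rw [show ((k + 1 : Nat) : Int) = (k : Int) + 1 by push_cast; ring]
    rfl

lemma mem_DLst (k : Nat) (j : Int) : j ∈ DLst k ↔ 0 ≤ j ∧ j ≤ (k : Int) := by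
  induction k with
  | zero => simp [DLst]; omega
  | succ k ih =>
    simp only [DLst, List.mem_cons, ih]
    push_cast
    omega

lemma ascL_zero : ascL 0 = [] := by
  unfold ascL
  exact PySem.List.pyRange_one_eq_nil (by simp)

lemma ascL_succ (k : Nat) : ascL (k + 1) = ascL k ++ [(k : Int)] := by
  unfold ascL
  rw [show ((k + 1 : Nat) : Int) = (k : Int) + 1 by push_cast; ring]
  exact PySem.List.pyRange_one_succ_right (by omega)

lemma mem_ascL (k : Nat) (j : Int) : j ∈ ascL k ↔ 0 ≤ j ∧ j < (k : Int) := by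
  unfold ascL
  rw [PySem.List.mem_pyRange_one]

lemma innerA_eq (ls pages : List Int) (i : Int) (js : List Int) (r res : Int) :
    leastInner ls pages i js r res =
      match js.find? (fun j => PySem.List.pyGetD ls i 0 == PySem.List.pyGetD pages j 0) with
      | none => (r, res)
      | some j => if j < r then (j, i) else (r, res) := by
  induction js with
  | nil => rfl
  | cons j rest ih =>
    by_cases h : PySem.List.pyGetD ls i 0 = PySem.List.pyGetD pages j 0
    · simp [leastInner, h]
    · simp [leastInner, h, ih]

lemma bFind_eq (ls : List Int) (p : Int) (fs : List Int) (res : Int) :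
    bFind ls p fs res =
      match fs.find? (fun i => PySem.List.pyGetD ls i 0 == p) with
      | none => res
      | some i => i := by
  induction fs with
  | nil => rfl
  | cons i rest ih =>
    by_cases h : PySem.List.pyGetD ls i 0 = p
    · simp [bFind, h]
    · simp [bFind, h, ih]

lemma bFind_default_irrel (ls : List Int) (p : Int) (fs : List Int) (res res' : Int)
    (h : fs.any (fun i => PySem.List.pyGetD ls i 0 == p) = true) :
    bFind ls p fs res = bFind ls p fs res' := by
  rw [bFind_eq, bFind_eq]
  obtain ⟨x, hx, hpx⟩ := List.any_eq_true.mp h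
  obtain ⟨w, hw⟩ := Option.isSome_iff_exists.mp
    ((List.find?_isSome (p := fun i => PySem.List.pyGetD ls i 0 == p)).mpr ⟨x, hx, hpx⟩)
  rw [hw]

lemma luv_some (pages : List Int) (m : Nat) (p j : Int) (h : luv pages m p = some j) :
    0 ≤ j ∧ j ≤ (m : Int) ∧ PySem.List.pyGetD pages j 0 = p := by
  unfold luv at h
  have h1 := List.find?_some h
  have h2 := List.mem_of_find?_eq_some h
  rw [mem_DLst] at h2
  exact ⟨h2.1, h2.2, (beq_iff_eq.mp h1).symm⟩

lemma luv_last (pages : List Int) (m : Nat) (p j : Int) (h : luv pages m p = some j) :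
    ∀ j', j < j' → j' ≤ (m : Int) → PySem.List.pyGetD pages j' 0 ≠ p := by
  induction m with
  | zero =>
    intro j' h1 h2
    have hb := luv_some pages 0 p j h
    have : False := by push_cast at hb h2; omega
    exact this.elim
  | succ k ih =>
    unfold luv at h
    rw [show DLst (k + 1) = ((k : Int) + 1) :: DLst k from rfl, List.find?_cons] at h
    cases hp : (p == PySem.List.pyGetD pages ((k : Int) + 1) 0) with
    | true =>
      rw [hp] at h
      have hj : j = (k : Int) + 1 := (Option.some.inj h).symm
      intro j' h1 h2
      have : False := by push_cast at h2; omega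
      exact this.elim
    | false =>
      rw [hp] at h
      have h' : luv pages k p = some j := h
      intro j' h1 h2
      by_cases hj' : j' ≤ (k : Int)
      · exact ih h' j' h1 hj'
      · have hj'' : j' = (k : Int) + 1 := by push_cast at h2; omega
        subst hj''
        intro heq
        rw [heq] at hp
        simp at hp

lemma luv_of (pages : List Int) (m : Nat) (p j : Int) (h0 : 0 ≤ j) (h1 : j ≤ (m : Int))
    (h2 : PySem.List.pyGetD pages j 0 = p)
    (h3 : ∀ j', j < j' → j' ≤ (m : Int) → PySem.List.pyGetD pages j' 0 ≠ p) :
    luv pages m p = some j := by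
  induction m with
  | zero =>
    have hj0 : j = 0 := by push_cast at h1; omega
    subst hj0
    unfold luv
    simp [DLst, h2]
  | succ k ih =>
    unfold luv
    rw [show DLst (k + 1) = ((k : Int) + 1) :: DLst k from rfl, List.find?_cons]
    by_cases hj : j = (k : Int) + 1
    · subst hj
      simp [h2]
    · have hk : j ≤ (k : Int) := by push_cast at h1; omega
      have hpf : (p == PySem.List.pyGetD pages ((k : Int) + 1) 0) = false := by
        have hne := h3 ((k : Int) + 1) (by omega) (by push_cast; omega)
        simp only [beq_eq_false_iff_ne, ne_eq]
        exact fun he => hne he.symm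
      rw [hpf]
      exact ih hk (fun j' ha hb => h3 j' ha (by push_cast at hb ⊢; omega))

lemma minF_none (L : List (Int × Int)) : minF L = none ↔ L = [] := by
  cases L <;> simp [minF]

lemma minF_spec (L : List (Int × Int)) (m : Int) (h : minF L = some m) :
    (∃ q ∈ L, q.1 = m) ∧ ∀ q ∈ L, m ≤ q.1 := by
  induction L generalizing m with
  | nil => simp [minF] at h
  | cons q L ih =>
    rw [minF] at h
    cases hL : minF L with
    | none =>
      rw [hL] at h
      have hL' : L = [] := (minF_none L).mp hL
      subst hL'
      simp only [Option.some.injEq] at h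
      constructor
      · exact ⟨q, by simp, h⟩
      · intro q' hq'
        simp only [List.mem_singleton] at hq'
        subst hq'
        omega
    | some m' =>
      rw [hL] at h
      simp only [Option.some.injEq] at h
      obtain ⟨⟨qa, hqa, hqa1⟩, hlb⟩ := ih m' hL
      constructor
      · by_cases hc : q.1 ≤ m'
        · exact ⟨q, by simp, by omega⟩
        · exact ⟨qa, by simp [hqa], by omega⟩
      · intro q' hq'
        rcases List.mem_cons.mp hq' with rfl | hmem
        · omega
        · have := hlb q' hmem; omega

lemma minFold_eq (L : List (Int × Int)) : ∀ (r res : Int),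
    minFold L (r, res) =
      match minF L with
      | none => (r, res)
      | some m => if m < r then (m, (((L.find? (fun q => q.1 == m)).map Prod.snd).getD res)) else (r, res) := by
  induction L with
  | nil => intro r res; rfl
  | cons q L ih =>
    rcases q with ⟨qj, qi⟩
    intro r res
    have step : minFold ((qj, qi) :: L) (r, res) = minFold L (if qj < r then (qj, qi) else (r, res)) := by
      simp only [minFold, List.foldl_cons]
    rw [step]
    cases hL : minF L with
    | none =>
      have hL' : L = [] := (minF_none L).mp hL
      subst hL'
      have hm : minF [(qj, qi)] = some qj := rfl
      rw [hm]
      dsimp only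
      by_cases hqr : qj < r
      · rw [if_pos hqr, if_pos hqr]
        simp [minFold]
      · rw [if_neg hqr, if_neg hqr]
        rfl
    | some m' =>
      have hm : minF ((qj, qi) :: L) = some (min qj m') := by rw [minF, hL]
      rw [hm]
      dsimp only
      by_cases hqr : qj < r
      · rw [if_pos hqr, ih qj qi, hL]
        dsimp only
        by_cases hmq : m' < qj
        · rw [if_pos hmq, show min qj m' = m' by omega, if_pos (show m' < r by omega)]
          obtain ⟨⟨qa, hqa, hqa1⟩, _⟩ := minF_spec L m' hL
          obtain ⟨w, hw⟩ := Option.isSome_iff_exists.mp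
            ((List.find?_isSome (p := fun q => q.1 == m')).mpr ⟨qa, hqa, by simp [hqa1]⟩)
          rw [List.find?_cons]
          dsimp only
          rw [show (qj == m') = false by simp only [beq_eq_false_iff_ne, ne_eq]; omega]
          dsimp only
          rw [hw]
          simp
        · rw [if_neg hmq, show min qj m' = qj by omega, if_pos hqr, List.find?_cons]
          dsimp only
          rw [beq_self_eq_true]
          simp
      · rw [if_neg hqr, ih r res, hL]
        dsimp only
        by_cases hmr : m' < r
        · rw [if_pos hmr, show min qj m' = m' by omega, if_pos hmr, List.find?_cons]
          dsimp only
          rw [show (qj == m') = false by simp only [beq_eq_false_iff_ne, ne_eq]; omega]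
        · rw [if_neg hmr, if_neg (show ¬ min qj m' < r by omega)]

lemma LAlist_cons (ls pages : List Int) (m : Nat) (i : Int) (fs : List Int) :
    LAlist ls pages m (i :: fs) =
      match luv pages m (PySem.List.pyGetD ls i 0) with
      | none => LAlist ls pages m fs
      | some j => (j, i) :: LAlist ls pages m fs := by
  unfold LAlist
  rw [List.filterMap_cons]
  cases luv pages m (PySem.List.pyGetD ls i 0) <;> simp

lemma A_fold (ls pages : List Int) (m : Nat) (fs : List Int) : ∀ (r res : Int),
    fs.foldl (fun st i => leastInner ls pages i (DLst m) st.1 st.2) (r, res) =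
      minFold (LAlist ls pages m fs) (r, res) := by
  induction fs with
  | nil => intro r res; rfl
  | cons i fs ih =>
    intro r res
    rw [List.foldl_cons, innerA_eq, LAlist_cons]
    have hfix : (DLst m).find? (fun j => PySem.List.pyGetD ls i 0 == PySem.List.pyGetD pages j 0)
        = luv pages m (PySem.List.pyGetD ls i 0) := rfl
    rw [hfix]
    cases h : luv pages m (PySem.List.pyGetD ls i 0) with
    | none => exact ih r res
    | some j =>
      have stepm : minFold ((j, i) :: LAlist ls pages m fs) (r, res)
          = minFold (LAlist ls pages m fs) (if j < r then (j, i) else (r, res)) := by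
        simp only [minFold, List.foldl_cons]
      rw [stepm]
      by_cases hjr : j < r
      · simp only [if_pos hjr]
        exact ih j i
      · simp only [if_neg hjr]
        exact ih r res

lemma find?_ascL_min (k : Nat) (p : Int → Bool) (x : Int) (h : (ascL k).find? p = some x) :
    ∀ t ∈ ascL k, t < x → p t = false := by
  induction k with
  | zero => intro t ht; rw [ascL_zero] at ht; simp at ht
  | succ k ih =>
    rw [ascL_succ, List.find?_append] at h
    intro t ht htx
    rw [ascL_succ] at ht
    rcases List.mem_append.mp ht with ht | ht
    · cases hfk : (ascL k).find? p with
      | some y =>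
        rw [hfk, Option.some_or] at h
        rw [h] at hfk
        exact ih hfk t ht htx
      | none =>
        have := List.find?_eq_none.mp hfk t ht
        simpa using this
    · simp only [List.mem_singleton] at ht
      subst ht
      cases hfk : (ascL k).find? p with
      | some y =>
        rw [hfk, Option.some_or] at h
        have hy := List.mem_of_find?_eq_some hfk
        rw [mem_ascL] at hy
        have hyx : y = x := Option.some.inj h
        exfalso; omega
      | none =>
        rw [hfk, Option.none_or] at h
        have hxk : x ∈ [(k : Int)] := List.mem_of_find?_eq_some h
        simp only [List.mem_singleton] at hxk
        exfalso; omega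

lemma LA_find (ls pages : List Int) (m : Nat) (fs : List Int) (mm : Int)
    (hlast : luv pages m (PySem.List.pyGetD pages mm 0) = some mm) :
    (LAlist ls pages m fs).find? (fun q => q.1 == mm) =
      (fs.find? (fun i => PySem.List.pyGetD ls i 0 == PySem.List.pyGetD pages mm 0)).map
        (fun i => (mm, i)) := by
  induction fs with
  | nil => rfl
  | cons i fs ih =>
    rw [LAlist_cons]
    cases h : luv pages m (PySem.List.pyGetD ls i 0) with
    | none =>
      have hne : (PySem.List.pyGetD ls i 0 == PySem.List.pyGetD pages mm 0) = false := by
        simp only [beq_eq_false_iff_ne, ne_eq]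
        intro he
        rw [he, hlast] at h
        simp at h
      rw [List.find?_cons]
      dsimp only
      rw [hne]
      exact ih
    | some j =>
      by_cases hv : PySem.List.pyGetD ls i 0 = PySem.List.pyGetD pages mm 0
      · have hj : j = mm := by
          rw [hv, hlast] at h
          exact (Option.some.inj h).symm
        subst hj
        rw [List.find?_cons, List.find?_cons]
        dsimp only
        rw [beq_self_eq_true]
        rw [show (PySem.List.pyGetD ls i 0 == PySem.List.pyGetD pages j 0) = true by
          simp only [beq_iff_eq]; exact hv]
        rfl
      · have hj : j ≠ mm := by
          intro hj
          subst hj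
          exact hv (luv_some pages m _ j h).2.2.symm
        rw [List.find?_cons, List.find?_cons]
        dsimp only
        rw [show (j == mm) = false by simp only [beq_eq_false_iff_ne, ne_eq]; exact hj]
        rw [show (PySem.List.pyGetD ls i 0 == PySem.List.pyGetD pages mm 0) = false by
          simp only [beq_eq_false_iff_ne, ne_eq]; exact hv]
        exact ih

-- the common closed form both sides reach
lemma bridge (ls pages : List Int) (m : Nat) (fs : List Int) :
    (match minF (LAlist ls pages m fs) with
      | none => (-1 : Int)
      | some mu => if mu < (m : Int)
          then ((((LAlist ls pages m fs).find? (fun q => q.1 == mu)).map Prod.snd).getD (-1))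
          else -1)
    = match (ascL m).find? (winb ls pages m fs) with
      | none => -1
      | some mm => bFind ls (PySem.List.pyGetD pages mm 0) fs (-1) := by
  -- membership in LAlist
  have hmemLA : ∀ j i : Int, (j, i) ∈ LAlist ls pages m fs ↔
      i ∈ fs ∧ luv pages m (PySem.List.pyGetD ls i 0) = some j := by
    intro j i
    unfold LAlist
    simp only [List.mem_filterMap, Option.map_eq_some_iff]
    constructor
    · rintro ⟨i', hi', j', hj', heq⟩
      injection heq with h1 h2
      subst h1
      subst h2
      exact ⟨hi', hj'⟩
    · rintro ⟨hi, hl⟩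
      exact ⟨i, hi, j, hl, rfl⟩
  -- any member of LAlist with fst < m is a win
  have hwin : ∀ j i : Int, (j, i) ∈ LAlist ls pages m fs → j < (m : Int) →
      winb ls pages m fs j = true ∧ 0 ≤ j := by
    intro j i hmem hjm
    obtain ⟨hi, hl⟩ := (hmemLA j i).mp hmem
    obtain ⟨hj0, hjm', hpj⟩ := luv_some pages m _ j hl
    have hlv : luv pages m (PySem.List.pyGetD pages j 0) = some j := by
      rw [hpj]; exact hl
    refine ⟨?_, hj0⟩
    unfold winb
    simp only [Bool.and_eq_true, decide_eq_true_eq, beq_iff_eq]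
    refine ⟨⟨hjm, by rw [hlv]⟩, ?_⟩
    exact List.any_eq_true.mpr ⟨i, hi, by simp [hpj]⟩
  cases hf : (ascL m).find? (winb ls pages m fs) with
  | none =>
    cases hmf : minF (LAlist ls pages m fs) with
    | none => rfl
    | some mu =>
      dsimp only
      by_cases hcm : mu < (m : Int)
      · exfalso
        obtain ⟨⟨q, hq, hq1⟩, _⟩ := minF_spec _ _ hmf
        rcases q with ⟨qj, qi⟩
        dsimp only at hq1
        rw [hq1] at hq
        obtain ⟨hw, h0⟩ := hwin mu qi hq hcm
        have hmem : mu ∈ ascL m := (mem_ascL m mu).mpr ⟨h0, hcm⟩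
        have := List.find?_eq_none.mp hf mu hmem
        rw [hw] at this
        exact this rfl
      · rw [if_neg hcm]
  | some mm =>
    have hwmm : winb ls pages m fs mm = true := List.find?_some hf
    have hmmmem : mm ∈ ascL m := List.mem_of_find?_eq_some hf
    obtain ⟨hmm0, hmmlt⟩ := (mem_ascL m mm).mp hmmmem
    unfold winb at hwmm
    simp only [Bool.and_eq_true, decide_eq_true_eq, beq_iff_eq] at hwmm
    obtain ⟨⟨_, hluv⟩, hany⟩ := hwmm
    obtain ⟨i0, hi0, hpi0⟩ := List.any_eq_true.mp hany
    have hpi0' : PySem.List.pyGetD ls i0 0 = PySem.List.pyGetD pages mm 0 := by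
      simpa using hpi0
    have hmmLA : (mm, i0) ∈ LAlist ls pages m fs := by
      rw [hmemLA]
      exact ⟨hi0, by rw [hpi0']; exact hluv⟩
    cases hmf : minF (LAlist ls pages m fs) with
    | none =>
      exfalso
      rw [minF_none] at hmf
      rw [hmf] at hmmLA
      exact List.not_mem_nil hmmLA
    | some mu =>
      dsimp only
      obtain ⟨⟨q, hq, hq1⟩, hlb⟩ := minF_spec _ _ hmf
      have hmule : mu ≤ mm := hlb _ hmmLA
      rcases q with ⟨qj, qi⟩
      dsimp only at hq1
      rw [hq1] at hq
      obtain ⟨hwmu, hmu0⟩ := hwin mu qi hq (by omega)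
      have hmumem : mu ∈ ascL m := (mem_ascL m mu).mpr ⟨hmu0, by omega⟩
      have hmueq : mu = mm := by
        by_contra hne
        have hlt : mu < mm := by omega
        have := find?_ascL_min m _ mm hf mu hmumem hlt
        rw [hwmu] at this
        exact Bool.noConfusion this
      subst hmueq
      rw [if_pos (by omega)]
      rw [LA_find ls pages m fs mu hluv]
      obtain ⟨w, hw⟩ := Option.isSome_iff_exists.mp
        ((List.find?_isSome (p := fun i => PySem.List.pyGetD ls i 0 == PySem.List.pyGetD pages mu 0)).mpr
          ⟨i0, hi0, hpi0⟩)
      rw [hw, bFind_eq, hw]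
      simp

lemma bStep_nil (ls pages : List Int) (nframes idx : Int) (seen : PySem.Set Int) (res : Int) :
    bStep ls pages nframes idx [] seen res = res := rfl

lemma bStep_cons (ls pages : List Int) (nframes idx j : Int) (rest : List Int)
    (seen : PySem.Set Int) (res : Int) :
    bStep ls pages nframes idx (j :: rest) seen res =
      (if PySem.Set.contains seen (PySem.List.pyGetD pages j 0) then
        bStep ls pages nframes idx rest seen res
      else
        bStep ls pages nframes idx rest (PySem.Set.add seen (PySem.List.pyGetD pages j 0))
          (if j < idx then bFind ls (PySem.List.pyGetD pages j 0) (PySem.List.pyRange 0 nframes 1) res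
           else res)) := rfl

lemma ascL_one : ascL 1 = [(0 : Int)] := by
  rw [show (1 : Nat) = 0 + 1 from rfl, ascL_succ, ascL_zero]
  rfl

lemma ascL_succ_succ (k : Nat) : ascL (k + 1 + 1) = ascL (k + 1) ++ [(k : Int) + 1] := by
  rw [ascL_succ (k + 1), show ((k + 1 : Nat) : Int) = (k : Int) + 1 by push_cast; ring]

lemma B_loop (ls pages : List Int) (nframes : Int) (m : Nat) : ∀ (k : Nat), k < m →
    ∀ (seen : PySem.Set Int) (res : Int),
    (∀ p : Int, PySem.Set.contains seen p = true ↔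
        ∃ j : Nat, k < j ∧ j ≤ m ∧ PySem.List.pyGetD pages (j : Int) 0 = p) →
    bStep ls pages nframes (m : Int) (DLst k) seen res =
      match (ascL (k + 1)).find? (winb ls pages m (PySem.List.pyRange 0 nframes 1)) with
      | none => res
      | some mm => bFind ls (PySem.List.pyGetD pages mm 0) (PySem.List.pyRange 0 nframes 1) res := by
  intro k
  induction k with
  | zero =>
    intro hk seen res hinv
    rw [show DLst 0 = [0] from rfl, bStep_cons]
    by_cases hc : PySem.Set.contains seen (PySem.List.pyGetD pages 0 0) = true
    · rw [if_pos hc, bStep_nil]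
      have hw : winb ls pages m (PySem.List.pyRange 0 nframes 1) 0 = false := by
        obtain ⟨j1, hj1, hj2, hj3⟩ := (hinv _).mp hc
        unfold winb
        cases hluv : luv pages m (PySem.List.pyGetD pages 0 0) with
        | none => simp
        | some j =>
          have hne : j ≠ 0 := by
            intro h0
            rw [h0] at hluv
            exact luv_last pages m _ 0 hluv (j1 : Int) (by exact_mod_cast hj1)
              (by exact_mod_cast hj2) hj3
          simp [hne]
      rw [ascL_one, List.find?_cons, hw]
      rfl
    · rw [if_neg hc, bStep_nil]
      have h0m : (0 : Int) < (m : Int) := by exact_mod_cast hk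
      rw [if_pos h0m]
      have hfresh : ∀ j', (0 : Int) < j' → j' ≤ (m : Int) →
          PySem.List.pyGetD pages j' 0 ≠ PySem.List.pyGetD pages 0 0 := by
        intro j' ha hb heq
        exact hc ((hinv _).mpr ⟨j'.toNat, by omega, by omega,
          by rw [show ((j'.toNat : Nat) : Int) = j' by omega]; exact heq⟩)
      have hluv : luv pages m (PySem.List.pyGetD pages 0 0) = some 0 :=
        luv_of pages m _ 0 le_rfl (by omega) rfl hfresh
      have hw : winb ls pages m (PySem.List.pyRange 0 nframes 1) 0
          = (PySem.List.pyRange 0 nframes 1).any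
              (fun i => PySem.List.pyGetD ls i 0 == PySem.List.pyGetD pages 0 0) := by
        unfold winb
        rw [hluv, show (decide ((0 : Int) < (m : Int))) = true from decide_eq_true h0m]
        simp
      rw [ascL_one, List.find?_cons, hw]
      cases hany : (PySem.List.pyRange 0 nframes 1).any
          (fun i => PySem.List.pyGetD ls i 0 == PySem.List.pyGetD pages 0 0) with
      | true => rfl
      | false =>
        rw [bFind_eq, List.find?_eq_none.mpr (List.any_eq_false.mp hany)]
        rfl
  | succ k ih =>
    intro hk seen res hinv
    rw [show DLst (k + 1) = ((k : Int) + 1) :: DLst k from rfl, bStep_cons]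
    by_cases hc : PySem.Set.contains seen (PySem.List.pyGetD pages ((k : Int) + 1) 0) = true
    · rw [if_pos hc]
      have hinv' : ∀ p : Int, PySem.Set.contains seen p = true ↔
          ∃ j : Nat, k < j ∧ j ≤ m ∧ PySem.List.pyGetD pages (j : Int) 0 = p := by
        intro p
        rw [hinv p]
        constructor
        · rintro ⟨j, h1, h2, h3⟩; exact ⟨j, by omega, h2, h3⟩
        · rintro ⟨j, h1, h2, h3⟩
          by_cases hj : k + 1 < j
          · exact ⟨j, hj, h2, h3⟩
          · have hjeq : j = k + 1 := by omega
            subst hjeq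
            have hpp : PySem.List.pyGetD pages ((k : Int) + 1) 0 = p := by
              rw [show ((k : Int) + 1) = (((k + 1 : Nat)) : Int) by push_cast; ring]
              exact h3
            rw [hpp] at hc
            exact (hinv p).mp hc
      rw [ih (by omega) seen res hinv']
      obtain ⟨j1, hj1a, hj1b, hj1c⟩ := (hinv _).mp hc
      have hwfalse : winb ls pages m (PySem.List.pyRange 0 nframes 1) ((k : Int) + 1) = false := by
        unfold winb
        cases hluv : luv pages m (PySem.List.pyGetD pages ((k : Int) + 1) 0) with
        | none => simp
        | some j =>
          have hne : j ≠ (k : Int) + 1 := by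
            intro h0
            rw [h0] at hluv
            exact luv_last pages m _ _ hluv (j1 : Int)
              (by exact_mod_cast hj1a) (by exact_mod_cast hj1b) hj1c
          simp [hne]
      rw [ascL_succ_succ, List.find?_append]
      cases hfk : (ascL (k + 1)).find? (winb ls pages m (PySem.List.pyRange 0 nframes 1)) with
      | some y => rw [Option.some_or]
      | none =>
        rw [Option.none_or, List.find?_cons, hwfalse]
        rfl
    · rw [if_neg hc]
      have hlt : ((k : Int) + 1) < (m : Int) := by
        have : ((k + 1 : Nat) : Int) < (m : Int) := by exact_mod_cast hk
        push_cast at this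
        omega
      rw [if_pos hlt]
      have hfresh : ∀ j', ((k : Int) + 1) < j' → j' ≤ (m : Int) →
          PySem.List.pyGetD pages j' 0 ≠ PySem.List.pyGetD pages ((k : Int) + 1) 0 := by
        intro j' ha hb heq
        exact hc ((hinv _).mpr ⟨j'.toNat, by omega, by omega,
          by rw [show ((j'.toNat : Nat) : Int) = j' by omega]; exact heq⟩)
      have hluv : luv pages m (PySem.List.pyGetD pages ((k : Int) + 1) 0) = some ((k : Int) + 1) :=
        luv_of pages m _ _ (by omega) (by omega) rfl hfresh
      have hinv' : ∀ p' : Int,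
          PySem.Set.contains (PySem.Set.add seen (PySem.List.pyGetD pages ((k : Int) + 1) 0)) p' = true ↔
          ∃ j : Nat, k < j ∧ j ≤ m ∧ PySem.List.pyGetD pages (j : Int) 0 = p' := by
        intro p'
        rw [PySem.Set.contains_iff, PySem.Set.mem_add]
        constructor
        · rintro (hmem | rfl)
          · obtain ⟨j, h1, h2, h3⟩ := (hinv p').mp ((PySem.Set.contains_iff seen p').mpr hmem)
            exact ⟨j, by omega, h2, h3⟩
          · exact ⟨k + 1, by omega, by omega,
              by rw [show (((k + 1 : Nat)) : Int) = (k : Int) + 1 by push_cast; ring]⟩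
        · rintro ⟨j, h1, h2, h3⟩
          by_cases hj : k + 1 < j
          · exact Or.inl ((PySem.Set.contains_iff seen p').mp ((hinv p').mpr ⟨j, hj, h2, h3⟩))
          · have hjeq : j = k + 1 := by omega
            subst hjeq
            right
            rw [← h3, show (((k + 1 : Nat)) : Int) = (k : Int) + 1 by push_cast; ring]
      rw [ih (by omega) _ _ hinv']
      rw [ascL_succ_succ, List.find?_append]
      cases hfk : (ascL (k + 1)).find? (winb ls pages m (PySem.List.pyRange 0 nframes 1)) with
      | some mm =>
        rw [Option.some_or]
        dsimp only
        have hwmm := List.find?_some hfk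
        unfold winb at hwmm
        simp only [Bool.and_eq_true] at hwmm
        exact bFind_default_irrel ls _ _ _ _ hwmm.2
      | none =>
        rw [Option.none_or, List.find?_cons]
        dsimp only
        have hw : winb ls pages m (PySem.List.pyRange 0 nframes 1) ((k : Int) + 1)
            = (PySem.List.pyRange 0 nframes 1).any
                (fun i => PySem.List.pyGetD ls i 0 == PySem.List.pyGetD pages ((k : Int) + 1) 0) := by
          unfold winb
          rw [hluv, show (decide (((k : Int) + 1) < (m : Int))) = true from decide_eq_true hlt]
          simp
        rw [hw]
        cases hany : (PySem.List.pyRange 0 nframes 1).any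
            (fun i => PySem.List.pyGetD ls i 0 == PySem.List.pyGetD pages ((k : Int) + 1) 0) with
        | true => rfl
        | false =>
          rw [bFind_eq, List.find?_eq_none.mpr (List.any_eq_false.mp hany)]
          rfl

lemma B_char (ls pages : List Int) (nframes : Int) (m : Nat) :
    bStep ls pages nframes (m : Int) (DLst m) PySem.Set.empty (-1) =
      match (ascL m).find? (winb ls pages m (PySem.List.pyRange 0 nframes 1)) with
      | none => -1
      | some mm => bFind ls (PySem.List.pyGetD pages mm 0) (PySem.List.pyRange 0 nframes 1) (-1) := by
  have hce : ∀ p : Int, ¬ PySem.Set.contains (PySem.Set.empty (α := Int)) p = true := by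
    intro p hp
    have := (PySem.Set.contains_iff _ _).mp hp
    simp [PySem.Set.empty] at this
  cases m with
  | zero =>
    rw [show DLst 0 = [0] from rfl, bStep_cons]
    rw [if_neg (hce _), if_neg (show ¬ (0 : Int) < ((0 : Nat) : Int) by simp), bStep_nil]
    rw [ascL_zero]
    rfl
  | succ k =>
    rw [show DLst (k + 1) = ((k : Int) + 1) :: DLst k from rfl, bStep_cons]
    rw [if_neg (hce _), if_neg (show ¬ ((k : Int) + 1) < ((k + 1 : Nat) : Int) by push_cast; omega)]
    exact B_loop ls pages nframes (k + 1) k (by omega) _ (-1) (by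
      intro p'
      rw [PySem.Set.contains_iff, PySem.Set.mem_add]
      constructor
      · rintro (hmem | rfl)
        · exact absurd hmem (by simp [PySem.Set.empty])
        · exact ⟨k + 1, by omega, by omega,
            by rw [show (((k + 1 : Nat)) : Int) = (k : Int) + 1 by push_cast; ring]⟩
      · rintro ⟨j, h1, h2, h3⟩
        have hjeq : j = k + 1 := by omega
        subst hjeq
        right
        rw [← h3, show (((k + 1 : Nat)) : Int) = (k : Int) + 1 by push_cast; ring])


-- ===== VERDICT (by name: the statement is the Claim_ definition above) =====
theorem least_spec : Claim_equal_least := by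
  intro ls pages nframes idx hDom hPre
  unfold Spec_least
  by_cases hn : nframes ≤ 0
  · unfold least least_alt
    rw [if_pos hn, PySem.List.pyRange_one_eq_nil hn]
    rfl
  · by_cases hidx : idx < 0
    · unfold least least_alt
      rw [if_neg hn, PySem.List.pyRange_neg_one_eq_nil (by omega : idx ≤ -1)]
      have hid : ∀ (fs : List Int) (st : Int × Int),
          fs.foldl (fun st i => leastInner ls pages i ([] : List Int) st.1 st.2) st = st := by
        intro fs
        induction fs with
        | nil => intro st; rfl
        | cons a fs ihf =>
          intro st
          rw [List.foldl_cons, show leastInner ls pages a [] st.1 st.2 = (st.1, st.2) from rfl]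
          rw [ihf]
      rw [hid, bStep_nil]
    · have hm0 : 0 ≤ idx := by omega
      rw [show idx = ((idx.toNat : Nat) : Int) from (Int.toNat_of_nonneg hm0).symm]
      unfold least least_alt
      rw [if_neg hn, pyRange_down, B_char, A_fold, minFold_eq,
        ← bridge ls pages idx.toNat (PySem.List.pyRange 0 nframes 1)]
      cases hmf : minF (LAlist ls pages idx.toNat (PySem.List.pyRange 0 nframes 1)) with
      | none => rfl
      | some mu =>
        dsimp only
        by_cases hcm : mu < ((idx.toNat : Nat) : Int)
        · rw [if_pos hcm, if_pos hcm]
        · rw [if_neg hcm, if_neg hcm]
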